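-- pv_equiv track=rewrite | github.com/hirotgr/visual-trading-gmma | gmma_5m_analyzer.py | true_runs
-- ===== SOURCE A (Python) =====
-- from typing import Dict, Iterable, List, Optional, Tuple
--
-- def true_runs(flags: List[bool], start: int = 0, end: Optional[int] = None) -> List[Tuple[int, int]]:
--     if end is None:
--         end = len(flags)
--     runs: List[Tuple[int, int]] = []
--     run_start: Optional[int] = None
--     for idx in range(max(0, start), min(len(flags), end)):
--         if flags[idx]:
--             if run_start is None:
--                 run_start = idx
--             continue
--         if run_start is not None:
--             runs.append((run_start, idx))
--             run_start = None
--     if run_start is not None: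
--         runs.append((run_start, min(len(flags), end)))
--     return runs
-- ===== SOURCE B (Python) =====
-- from itertools import groupby
-- from typing import List, Optional, Tuple
--
-- def true_runs(flags: List[bool], start: int = 0, end: Optional[int] = None) -> List[Tuple[int, int]]:
--     if end is None:
--         end = len(flags)
--     lo = max(0, start)
--     hi = max(lo, min(len(flags), end))
--     runs: List[Tuple[int, int]] = []
--     pos = lo
--     for value, group in groupby(flags[lo:hi]):
--         length = sum(1 for _ in group)
--         if value:
--             runs.append((pos, pos + length))
--         pos += length
--     return runs
-- ===== Notes on version B (the rewrite author's own statement) =====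
-- stated objective: idiomatic
-- what changed: Replaces A's hand-tracked run_start state machine over indices with run-length grouping (itertools.groupby) of the clamped slice, emitting one (pos, pos+length) tuple per true group.
import Mathlib
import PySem

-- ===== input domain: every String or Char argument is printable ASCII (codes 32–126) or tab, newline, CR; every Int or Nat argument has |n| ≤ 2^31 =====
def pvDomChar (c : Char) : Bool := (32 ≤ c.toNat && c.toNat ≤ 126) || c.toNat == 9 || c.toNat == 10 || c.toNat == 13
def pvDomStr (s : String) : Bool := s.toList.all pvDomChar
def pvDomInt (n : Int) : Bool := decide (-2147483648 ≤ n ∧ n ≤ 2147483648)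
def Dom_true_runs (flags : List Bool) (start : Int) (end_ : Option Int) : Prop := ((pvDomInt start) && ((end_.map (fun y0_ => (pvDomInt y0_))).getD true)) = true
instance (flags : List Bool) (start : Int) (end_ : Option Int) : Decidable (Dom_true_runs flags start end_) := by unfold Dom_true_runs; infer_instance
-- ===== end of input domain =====

-- B replaces A's hand-tracked run_start state machine by run-length grouping (itertools.groupby)
-- over the clamped slice; objective: idiomatic. Both are one O(n) pass.

-- ===== PORT A =====
-- loop body of A: index idx is always inside [0, len flags) here, so pyGetD is exact for flags[idx]
def stepA (flags : List Bool) (st : List (Int × Int) × Option Int) (idx : Int) :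
    List (Int × Int) × Option Int :=
  if PySem.List.pyGetD flags idx false then
    match st.2 with
    | none => (st.1, some idx)
    | some _ => st
  else
    match st.2 with
    | some s => (st.1 ++ [(s, idx)], none)
    | none => st

-- the trailing 'if run_start is not None: runs.append((run_start, min(len(flags), end)))'
def finalizeA (st : List (Int × Int) × Option Int) (stop : Int) : List (Int × Int) :=
  match st.2 with
  | some s => st.1 ++ [(s, stop)]
  | none => st.1

def true_runs (flags : List Bool) (start : Int) (end_ : Option Int) : List (Int × Int) :=
  let e := end_.getD (flags.length : Int)
  let r := (PySem.List.pyRange (max 0 start) (min (flags.length : Int) e) 1).foldl (stepA flags) ([], none)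
  finalizeA r (min (flags.length : Int) e)

-- ===== PORT B =====
-- itertools.groupby over a Bool list, with each group collapsed to (value, length)
def pyGroups : List Bool → List (Bool × Nat)
  | [] => []
  | x :: xs =>
      (x, (xs.takeWhile (· == x)).length + 1) :: pyGroups (xs.dropWhile (· == x))
  termination_by l => l.length
  decreasing_by
    simp only [List.length_cons]
    exact Nat.lt_succ_of_le (List.length_dropWhile_le _ _)

-- loop body of B: emit the group if its value is true, always advance pos
def stepB (st : List (Int × Int) × Int) (g : Bool × Nat) : List (Int × Int) × Int :=
  ((if g.1 then st.1 ++ [(st.2, st.2 + (g.2 : Int))] else st.1), st.2 + (g.2 : Int))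

def true_runs_alt (flags : List Bool) (start : Int) (end_ : Option Int) : List (Int × Int) :=
  let e := end_.getD (flags.length : Int)
  let lo := max 0 start
  let hi := max lo (min (flags.length : Int) e)
  let seg := PySem.List.slice flags (some lo) (some hi)
  ((pyGroups seg).foldl stepB ([], lo)).1

-- ===== PRECONDITION & SPEC =====
def Spec_true_runs (flags : List Bool) (start : Int) (end_ : Option Int) (out : List (Int × Int)) : Prop := out = true_runs_alt flags start end_
instance (flags : List Bool) (start : Int) (end_ : Option Int) (out : List (Int × Int)) : Decidable (Spec_true_runs flags start end_ out) := by unfold Spec_true_runs; infer_instance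

-- ===== CLAIM (what is proved, stated in full; the proofs are below) =====
def Claim_equal_true_runs : Prop := ∀ (flags : List Bool) (start : Int) (end_ : Option Int), Dom_true_runs flags start end_ → Spec_true_runs flags start end_ (true_runs flags start end_)

-- ===== LEMMAS AND PROOFS =====

-- A's loop body, expressed on the value of the flag rather than the index lookup
def stepV (f : Bool) (pos : Int) (st : List (Int × Int) × Option Int) :
    List (Int × Int) × Option Int :=
  if f then
    match st.2 with
    | none => (st.1, some pos)
    | some _ => st
  else
    match st.2 with
    | some s => (st.1 ++ [(s, pos)], none)
    | none => st

-- A's loop, run structurally over the segment with an explicit position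
def foldSeg : List Bool → Int → List (Int × Int) × Option Int → List (Int × Int) × Option Int
  | [], _, st => st
  | f :: t, pos, st => foldSeg t (pos + 1) (stepV f pos st)

theorem foldSeg_append (u v : List Bool) (pos : Int) (st : List (Int × Int) × Option Int) :
    foldSeg (u ++ v) pos st = foldSeg v (pos + u.length) (foldSeg u pos st) := by
  induction u generalizing pos st with
  | nil => simp [foldSeg]
  | cons f t ih =>
      simp only [List.cons_append, foldSeg, ih, List.length_cons]
      rw [show pos + ((t.length + 1 : Nat) : Int) = (pos + 1) + (t.length : Int) by push_cast; ring]

theorem foldSeg_replicate_false (m : Nat) (pos : Int) (acc : List (Int × Int)) :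
    foldSeg (List.replicate m false) pos (acc, none) = (acc, none) := by
  induction m generalizing pos with
  | zero => rfl
  | succ k ih => simpa [List.replicate_succ, foldSeg, stepV] using ih (pos + 1)

theorem foldSeg_replicate_true (m : Nat) (pos s : Int) (acc : List (Int × Int)) :
    foldSeg (List.replicate m true) pos (acc, some s) = (acc, some s) := by
  induction m generalizing pos with
  | zero => rfl
  | succ k ih => simpa [List.replicate_succ, foldSeg, stepV] using ih (pos + 1)

theorem takeWhile_beq_replicate (x : Bool) (l : List Bool) :
    l.takeWhile (· == x) = List.replicate (l.takeWhile (· == x)).length x := by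
  apply List.eq_replicate_length.mpr
  intro b hb
  simpa using List.mem_takeWhile_imp hb

-- A's state machine over a segment, closed at the segment's end, equals B's fold over the groups
theorem foldSeg_groups (t : List Bool) (pos : Int) (acc : List (Int × Int)) :
    finalizeA (foldSeg t pos (acc, none)) (pos + t.length)
      = ((pyGroups t).foldl stepB (acc, pos)).1 := by
  match t with
  | [] => simp [foldSeg, pyGroups, finalizeA]
  | x :: xs =>
    have hk : xs.takeWhile (· == x) = List.replicate (xs.takeWhile (· == x)).length x :=
      takeWhile_beq_replicate x xs
    set k := (xs.takeWhile (· == x)).length with hkdef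
    set rest := xs.dropWhile (· == x) with hrest
    have hxs : x :: xs = List.replicate (k + 1) x ++ rest := by
      rw [List.replicate_succ, List.cons_append]
      congr 1
      conv_lhs => rw [← List.takeWhile_append_dropWhile (p := (· == x)) (l := xs)]
      rw [← hk, hrest]
    have hgroups : pyGroups (x :: xs) = (x, k + 1) :: pyGroups rest := by
      rw [pyGroups]
    have hlen : xs.length = k + rest.length := by
      have := congrArg List.length hxs
      simp [List.length_replicate] at this
      omega
    have hsplit : foldSeg (x :: xs) pos (acc, none)
        = foldSeg rest (pos + (k + 1 : Nat)) (foldSeg (List.replicate (k + 1) x) pos (acc, none)) := by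
      conv_lhs => rw [hxs]
      rw [foldSeg_append]
      simp
    cases x with
    | false =>
      have ih := foldSeg_groups rest (pos + (k + 1 : Nat)) acc
      rw [hgroups, hsplit, foldSeg_replicate_false]
      simp only [List.foldl_cons, stepB]
      rw [show pos + (((false : Bool) :: xs).length : Int) = (pos + (k + 1 : Nat)) + rest.length by
        simp [List.length_cons, hlen]; ring]
      rw [ih]
      norm_num
    | true =>
      have hrun : foldSeg (List.replicate (k + 1) true) pos (acc, none) = (acc, some pos) := by
        rw [List.replicate_succ]
        show foldSeg _ _ _ = _
        rw [foldSeg]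
        simp only [stepV]
        exact foldSeg_replicate_true k (pos + 1) pos acc
      rw [hgroups, hsplit, hrun]
      cases hr : rest with
      | nil =>
        simp only [foldSeg, List.foldl_cons, stepB, finalizeA]
        simp [hlen, hr, pyGroups]
      | cons y r' =>
        have hy : y = false := by
          have hne : xs.dropWhile (· == (true : Bool)) ≠ [] := by rw [← hrest, hr]; simp
          have hhd := List.head_dropWhile_not (fun x => x == (true : Bool)) hne
          have hcons : List.dropWhile (fun x => x == (true : Bool)) xs = y :: r' := by
            rw [← hrest]; exact hr
          have h1 : (List.dropWhile (fun x => x == (true : Bool)) xs).head hne = y := by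
            simp only [hcons, List.head_cons]
          rw [h1] at hhd
          simpa using hhd
        subst hy
        have hk2 : r'.takeWhile (· == false) = List.replicate (r'.takeWhile (· == false)).length false :=
          takeWhile_beq_replicate false r'
        set j := (r'.takeWhile (· == false)).length with hjdef
        set r2 := r'.dropWhile (· == false) with hr2
        have hr' : r' = List.replicate j false ++ r2 := by
          conv_lhs => rw [← List.takeWhile_append_dropWhile (p := (· == false)) (l := r')]
          rw [← hk2, hr2]
        have hgroups2 : pyGroups ((false : Bool) :: r') = (false, j + 1) :: pyGroups r2 := by
          rw [pyGroups]
        have hlenr : rest.length = 1 + j + r2.length := by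
          have hlr' : r'.length = j + r2.length := by simpa using congrArg List.length hr'
          rw [hr]
          simp only [List.length_cons]
          omega
        have hstep1 : foldSeg ((false : Bool) :: r') (pos + (k + 1 : Nat)) (acc, some pos)
            = foldSeg r2 (pos + (k + 1 : Nat) + 1 + (j : Nat)) (acc ++ [(pos, pos + (k + 1 : Nat))], none) := by
          rw [foldSeg]
          have hsv : stepV false (pos + (k + 1 : Nat)) (acc, some pos)
              = (acc ++ [(pos, pos + (k + 1 : Nat))], none) := by simp [stepV]
          rw [hsv]
          conv_lhs => rw [hr']
          rw [foldSeg_append, foldSeg_replicate_false]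
          congr 1
          simp
        have ih := foldSeg_groups r2 (pos + (k + 1 : Nat) + 1 + (j : Nat)) (acc ++ [(pos, pos + (k + 1 : Nat))])
        rw [hstep1]
        rw [show pos + (((true : Bool) :: xs).length : Int)
            = (pos + (k + 1 : Nat) + 1 + (j : Nat)) + r2.length by
          have hlr' : r'.length = j + r2.length := by simpa using congrArg List.length hr'
          simp only [List.length_cons, hlen, hr]
          push_cast
          omega]
        rw [ih, hgroups2]
        simp only [List.foldl_cons]
        have e1 : stepB (acc, pos) (true, k + 1)
            = (acc ++ [(pos, pos + ((k + 1 : Nat) : Int))], pos + ((k + 1 : Nat) : Int)) := by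
          simp [stepB]
        have e2 : stepB (acc ++ [(pos, pos + ((k + 1 : Nat) : Int))], pos + ((k + 1 : Nat) : Int)) (false, j + 1)
            = (acc ++ [(pos, pos + ((k + 1 : Nat) : Int))], pos + ((k + 1 : Nat) : Int) + ((j + 1 : Nat) : Int)) := by
          simp [stepB]
        rw [e1, e2]
        rw [show pos + ((k + 1 : Nat) : Int) + ((j + 1 : Nat) : Int)
            = pos + ((k + 1 : Nat) : Int) + 1 + (j : Int) by push_cast; ring]
  termination_by t.length
  decreasing_by
  · simp only [List.length_cons]
    exact Nat.lt_succ_of_le (List.length_dropWhile_le _ _)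
  · have h1 : (List.dropWhile (fun x => x == false) r').length ≤ r'.length :=
      List.length_dropWhile_le _ _
    have h2 : (List.dropWhile (fun x => x == true) xs).length ≤ xs.length :=
      List.length_dropWhile_le _ _
    have h3 : rest.length = 1 + r'.length := by rw [hr]; simp only [List.length_cons]; omega
    have h4 : rest.length ≤ xs.length := by rw [hrest]; exact h2
    simp only [List.length_cons]
    omega

-- A's indexed loop over range(lo, hi) equals the structural loop over the segment it reads
theorem foldA (flags : List Bool) (t : List Bool) (pos : Int)
    (st : List (Int × Int) × Option Int) (hpos : 0 ≤ pos)
    (hget : ∀ k : Nat, k < t.length → flags.getD (pos.toNat + k) false = t.getD k false) :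
    (PySem.List.pyRange pos (pos + t.length) 1).foldl (stepA flags) st = foldSeg t pos st := by
  induction t generalizing pos st with
  | nil =>
      rw [show pos + (([] : List Bool).length : Int) = pos by simp]
      rw [PySem.List.pyRange_one_eq_nil le_rfl]
      rfl
  | cons f t ih =>
      have hlt : pos < pos + ((f :: t).length : Int) := by simp
      rw [PySem.List.pyRange_one_cons hlt, List.foldl_cons]
      have hhead : PySem.List.pyGetD flags pos false = f := by
        rw [PySem.List.pyGetD_of_nonneg flags false hpos]
        have := hget 0 (by simp)
        simpa using this
      have hstep : stepA flags st pos = stepV f pos st := by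
        rw [stepA, stepV, hhead]
      rw [hstep]
      have harith : pos + ((f :: t).length : Int) = (pos + 1) + (t.length : Int) := by
        simp [List.length_cons]; ring
      rw [harith, foldSeg]
      apply ih (pos + 1) _ (by omega)
      intro k hkl
      have := hget (k + 1) (by simp; omega)
      have hto : (pos + 1).toNat = pos.toNat + 1 := by omega
      rw [hto]
      simpa [Nat.add_comm, Nat.add_assoc, Nat.add_left_comm] using this

-- ===== VERDICT (by name: the statement is the Claim_ definition above) =====
theorem true_runs_spec : Claim_equal_true_runs := by
  intro flags start end_ _hdom
  unfold Spec_true_runs true_runs true_runs_alt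
  dsimp only
  set n : Int := (flags.length : Int) with hn
  set e : Int := end_.getD n with he
  set lo : Int := max 0 start with hlo
  set hi0 : Int := min n e with hhi0
  have hlo0 : 0 ≤ lo := le_max_left 0 start
  by_cases hcase : hi0 ≤ lo
  · -- empty range: A folds over [], B groups the empty slice
    have hmax : max lo hi0 = lo := max_eq_left hcase
    rw [PySem.List.pyRange_one_eq_nil hcase, hmax]
    have hseg : PySem.List.slice flags (some lo) (some lo) = [] := by
      rw [PySem.List.slice_toNat flags hlo0 hlo0]
      simp
    rw [hseg]
    simp [finalizeA, pyGroups]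
  · rw [not_le] at hcase
    have hhi0nn : 0 ≤ hi0 := le_of_lt (lt_of_le_of_lt hlo0 hcase)
    have hmax : max lo hi0 = hi0 := max_eq_right (le_of_lt hcase)
    rw [hmax]
    set seg := PySem.List.slice flags (some lo) (some hi0) with hseg
    have hsegval : seg = (flags.drop lo.toNat).take (hi0.toNat - lo.toNat) := by
      rw [hseg, PySem.List.slice_toNat flags hlo0 hhi0nn]
    have hhi0le : hi0 ≤ n := min_le_left n e
    have hseglen : seg.length = hi0.toNat - lo.toNat := by
      rw [hsegval]
      simp only [List.length_take, List.length_drop]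
      omega
    have hrange : hi0 = lo + (seg.length : Int) := by
      rw [hseglen]; omega
    rw [hrange]
    rw [foldA flags seg lo ([], none) hlo0 ?_]
    · have := foldSeg_groups seg lo []
      unfold finalizeA at this ⊢
      exact this
    · intro k hk
      rw [hseglen] at hk
      have hkin : lo.toNat + k < flags.length := by omega
      rw [List.getD_eq_getElem _ _ hkin]
      have hkseg : k < seg.length := by omega
      rw [List.getD_eq_getElem _ _ hkseg]
      simp only [hsegval, List.getElem_take, List.getElem_drop]
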